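-- pv_equiv track=rewrite | github.com/eunhee-dev/problem-solving | 0x10. dynamic programming/2240번. 자두나무/solve.py | solve
-- ===== SOURCE A (Python) =====
-- def solve(t: int, w: int, trees: list[int]) -> int:
--     trees = [0] + trees
--     dp = [[[0] * 3 for _ in range(w + 1)] for _ in range(t + 1)]
--     dp[1][0][1] = 1 if trees[1] == 1 else 0
--     dp[1][1][2] = 1 if trees[1] == 2 else 0
--
--     for i in range(2, t + 1):
--         for j in range(w + 1):
--             plum_loc = trees[i]
--             other_loc = 3 - plum_loc
--             dp[i][j][other_loc] = dp[i - 1][j][other_loc]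
--             if j > 0:
--                 dp[i][j][plum_loc] = max(dp[i - 1][j][plum_loc], dp[i - 1][j - 1][other_loc]) + 1
--             else:
--                 dp[i][j][plum_loc] = dp[i - 1][j][plum_loc] + 1
--
--     return max(val for row in dp[t] for val in row)
-- ===== SOURCE B (Python) =====
-- def solve(t: int, w: int, trees: list[int]) -> int:
--     # Run-length compressed DP: a maximal run of c equal plum drops is absorbed
--     # in one O(w) row update (the cells whose move-count parity matches the run's
--     # tree gain c at once), instead of A's per-second update of a
--     # (t+1) x (w+1) x 3 table.
--     e = [0] * (w + 1)
--     e[0] = 1 if trees[0] == 1 else 0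
--     e[1] = 1 if trees[0] == 2 else 0
--     f = [0] * (w + 1)
--     i = 1
--     while i < t:
--         v = trees[i]
--         c = 1
--         while i + c < t and trees[i + c] == v:
--             c += 1
--         pe = [1, 2].index(v)  # move-count parity at which row e catches this run
--         e = [(e[j] if j == 0 else max(e[j], e[j - 1])) + c if j % 2 == pe else e[j]
--              for j in range(w + 1)]
--         f = [(f[j] if j == 0 else max(f[j], f[j - 1])) + c if j % 2 == 1 - pe else f[j]
--              for j in range(w + 1)]
--         i += c
--     return max(e + f)
-- ===== Notes on version B (the rewrite author's own statement) =====
-- stated objective: alternative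
-- what changed: Replaces A's second-by-second fill of a (t+1) x (w+1) x 3 DP table by a run-length compressed DP: the input is consumed run by run (a maximal block of c equal plum drops), and each whole block is absorbed in a single closed-form O(w) update of two 1-D parity rows (matching-parity cells gain c at once), with the answer read off as the max of the two final rows.
import Mathlib
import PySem

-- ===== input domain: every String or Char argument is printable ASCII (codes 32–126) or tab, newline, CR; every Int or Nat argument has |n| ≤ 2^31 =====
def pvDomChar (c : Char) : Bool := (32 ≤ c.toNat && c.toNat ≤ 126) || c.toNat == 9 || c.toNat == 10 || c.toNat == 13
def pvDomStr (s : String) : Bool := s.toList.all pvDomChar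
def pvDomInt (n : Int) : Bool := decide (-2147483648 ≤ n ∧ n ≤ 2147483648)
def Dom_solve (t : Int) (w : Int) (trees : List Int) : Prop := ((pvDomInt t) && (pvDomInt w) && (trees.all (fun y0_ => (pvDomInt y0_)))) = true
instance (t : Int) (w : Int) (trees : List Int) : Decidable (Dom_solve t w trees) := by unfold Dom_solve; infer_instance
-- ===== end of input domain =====

-- B replaces A's per-second 3-D time×moves×location DP table by a run-length compressed DP:
-- each maximal run of c equal plum drops is absorbed in one O(w) update of two 1-D parity rows.


-- ===== PORT A =====
-- A-side helpers: read/write of the 3-D list table; Nat indices (Pre_ guarantees every index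
-- Python touches is nonnegative and in range, so getD/set are exact there).
def getCell (dp : List (List (List Int))) (i j k : Nat) : Int :=
  ((dp.getD i []).getD j []).getD k 0

def setCell (dp : List (List (List Int))) (i j k : Nat) (v : Int) : List (List (List Int)) :=
  dp.set i ((dp.getD i []).set j (((dp.getD i []).getD j []).set k v))

-- the body of A's inner 'for j in range(w + 1)' loop, at time i
def stepA (trees' : List Int) (i : Int) (dp : List (List (List Int))) (j : Int) :
    List (List (List Int)) :=
  let plum := PySem.List.pyGetD trees' i 0
  let other := 3 - plum
  let dpa := setCell dp i.toNat j.toNat other.toNat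
               (getCell dp (i - 1).toNat j.toNat other.toNat)
  if 0 < j then
    setCell dpa i.toNat j.toNat plum.toNat
      (max (getCell dpa (i - 1).toNat j.toNat plum.toNat)
           (getCell dpa (i - 1).toNat (j - 1).toNat other.toNat) + 1)
  else
    setCell dpa i.toNat j.toNat plum.toNat
      (getCell dpa (i - 1).toNat j.toNat plum.toNat + 1)

-- one iteration of A's outer 'for i in range(2, t + 1)' loop
def rowLoopA (trees' : List Int) (w : Int) (dp : List (List (List Int))) (i : Int) :
    List (List (List Int)) :=
  (PySem.List.pyRange 0 (w + 1) 1).foldl (stepA trees' i) dp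

def solve (t : Int) (w : Int) (trees : List Int) : Int :=
  let trees' := 0 :: trees
  let dp0 : List (List (List Int)) :=
    List.replicate (t + 1).toNat (List.replicate (w + 1).toNat [0, 0, 0])
  let dp1 := setCell dp0 1 0 1 (if PySem.List.pyGetD trees' 1 0 = 1 then 1 else 0)
  let dp2 := setCell dp1 1 1 2 (if PySem.List.pyGetD trees' 1 0 = 2 then 1 else 0)
  let dp3 := (PySem.List.pyRange 2 (t + 1) 1).foldl (rowLoopA trees' w) dp2
  -- max(generator) over the flattened last row; Pre_ guarantees it is nonempty
  (PySem.List.max? ((PySem.List.pyGetD dp3 t []).flatten) (fun v => v)).getD 0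

-- ===== PORT B =====
-- one block of B's outer while loop: a run of c equal drops at tree v updates both parity rows
-- (the two list comprehensions over range(w + 1))
def blockRows (w : Int) (v c : Int) (ef : List Int × List Int) : List Int × List Int :=
  -- pe = [1, 2].index(v); Python raises ValueError when v is not a tree, the default 2
  -- is never a parity, and Pre_ excludes those inputs
  let pe : Int := (((PySem.List.index? [(1 : Int), 2] v).getD 2 : Nat) : Int)
  ((PySem.List.pyRange 0 (w + 1) 1).map (fun j =>
      if PySem.Int.mod j 2 = pe then
        (if j = 0 then PySem.List.pyGetD ef.1 j 0
         else max (PySem.List.pyGetD ef.1 j 0) (PySem.List.pyGetD ef.1 (j - 1) 0)) + c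
      else PySem.List.pyGetD ef.1 j 0),
   (PySem.List.pyRange 0 (w + 1) 1).map (fun j =>
      if PySem.Int.mod j 2 = 1 - pe then
        (if j = 0 then PySem.List.pyGetD ef.2 j 0
         else max (PySem.List.pyGetD ef.2 j 0) (PySem.List.pyGetD ef.2 (j - 1) 0)) + c
      else PySem.List.pyGetD ef.2 j 0))

-- B's 'while i < t' loop over the remaining drops trees[i:t]: the inner while that counts
-- the leading run of elements equal to v is the takeWhile length, and 'i += c' drops the run
def loopB (w : Int) : List Int → List Int × List Int → List Int × List Int
  | [], ef => ef
  | v :: rest, ef =>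
    loopB w (rest.drop (rest.takeWhile (fun x => x == v)).length)
      (blockRows w v (((rest.takeWhile (fun x => x == v)).length : Int) + 1) ef)
  termination_by l => l.length
  decreasing_by simp only [List.length_drop, List.length_cons]; omega

def solve_alt (t : Int) (w : Int) (trees : List Int) : Int :=
  let e0 := ((List.replicate (w + 1).toNat (0 : Int)).set 0
      (if PySem.List.pyGetD trees 0 0 = 1 then 1 else 0)).set 1
      (if PySem.List.pyGetD trees 0 0 = 2 then 1 else 0)
  let f0 : List Int := List.replicate (w + 1).toNat 0
  let ef := loopB w (PySem.List.slice trees (some 1) (some t)) (e0, f0)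
  (PySem.List.max? (ef.1 ++ ef.2) (fun v => v)).getD 0

-- ===== PRECONDITION & SPEC =====
-- Pre_ is exactly where the Python A returns: it raises IndexError when t < 1 (dp[1]),
-- w < 1 (dp[1][1]), len(trees) < t (trees[i]), or some tree slot read at times 2..t
-- lies outside {1,2} (location index out of range).
def Pre_solve (t : Int) (w : Int) (trees : List Int) : Prop :=
  1 ≤ t ∧ 1 ≤ w ∧ t ≤ (trees.length : Int) ∧
    ∀ v ∈ (trees.take t.toNat).drop 1, v = 1 ∨ v = 2
instance (t : Int) (w : Int) (trees : List Int) : Decidable (Pre_solve t w trees) := by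
  unfold Pre_solve; infer_instance

def pvWitness_solve : Int × Int × List Int := (2, 1, [2, 2])

def Spec_solve (t : Int) (w : Int) (trees : List Int) (out : Int) : Prop := out = solve_alt t w trees
instance (t : Int) (w : Int) (trees : List Int) (out : Int) : Decidable (Spec_solve t w trees out) := by unfold Spec_solve; infer_instance

-- ===== CLAIM (what is proved, stated in full; the proofs are below) =====
def Claim_equal_solve : Prop := ∀ (t : Int) (w : Int) (trees : List Int), Dom_solve t w trees → Pre_solve t w trees → Spec_solve t w trees (solve t w trees)

-- ===== LEMMAS AND PROOFS =====

-- The common specification: value of the start-at-1 parity plane (rowE) and of the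
-- mirrored zero-seeded plane (rowF) after s steps beyond time 1, with exactly j moves.
def rowE (g : Nat → Int) : Nat → Nat → Int
  | 0, j => if (j = 0 ∧ g 0 = 1) ∨ (j = 1 ∧ g 0 = 2) then 1 else 0
  | s + 1, j =>
    if g (s + 1) = ((1 + j % 2 : Nat) : Int) then
      (if j = 0 then rowE g s 0 else max (rowE g s j) (rowE g s (j - 1))) + 1
    else rowE g s j

def rowF (g : Nat → Int) : Nat → Nat → Int
  | 0, _ => 0
  | s + 1, j =>
    if g (s + 1) = ((2 - j % 2 : Nat) : Int) then
      (if j = 0 then rowF g s 0 else max (rowF g s j) (rowF g s (j - 1))) + 1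
    else rowF g s j

def gv (trees : List Int) (s : Nat) : Int := trees.getD s 0

-- contents of slot 1 resp. slot 2 of a table cell, in terms of the two parity planes
def cell1 (trees : List Int) (s j : Nat) : Int :=
  if j % 2 = 0 then rowE (gv trees) s j else rowF (gv trees) s j
def cell2 (trees : List Int) (s j : Nat) : Int :=
  if j % 2 = 0 then rowF (gv trees) s j else rowE (gv trees) s j

theorem rowE_nonneg (g : Nat → Int) (s j : Nat) : 0 ≤ rowE g s j := by
  induction s generalizing j with
  | zero => simp only [rowE]; split <;> norm_num
  | succ s ih =>
    simp only [rowE]; split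
    · split
      · have := ih 0; omega
      · have h1 := ih j; have := le_max_left (rowE g s j) (rowE g s (j - 1)); omega
    · exact ih j

-- ---- small getD / set facts ----
theorem getD_set_self {α : Type} (l : List α) (n : Nat) (h : n < l.length) (a d : α) :
    (l.set n a).getD n d = a := by
  simp [List.getD_eq_getElem?_getD, h]

theorem getD_set_ne {α : Type} (l : List α) (n m : Nat) (h : m ≠ n) (a d : α) :
    (l.set n a).getD m d = l.getD m d := by
  simp [List.getD_eq_getElem?_getD, h.symm]

theorem getD_replicate {α : Type} (n : Nat) (a : α) (i : Nat) (d : α) :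
    (List.replicate n a).getD i d = if i < n then a else d := by
  simp [List.getD_eq_getElem?_getD, List.getElem?_replicate]
  split <;> simp

-- ---- table well-formedness ----
def Wf (dp : List (List (List Int))) (T W : Nat) : Prop :=
  dp.length = T + 1 ∧ (∀ i, i < T + 1 → (dp.getD i []).length = W + 1) ∧
    (∀ i j, i < T + 1 → j < W + 1 → ((dp.getD i []).getD j []).length = 3)

theorem wf_setCell (dp : List (List (List Int))) (T W i j k : Nat) (v : Int)
    (h : Wf dp T W) : Wf (setCell dp i j k v) T W := by
  obtain ⟨h1, h2, h3⟩ := h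
  refine ⟨by simp [setCell, h1], ?_, ?_⟩ <;> intro i' <;>
    [skip; intro j'] <;> intro hi' <;> [skip; intro hj']
  · by_cases hii : i' = i
    · subst hii
      rw [setCell, getD_set_self _ _ (by omega) _ _]
      · rw [List.length_set]; exact h2 i' hi'
    · rw [setCell, getD_set_ne _ _ _ hii]; exact h2 i' hi'
  · by_cases hii : i' = i
    · subst hii
      rw [setCell, getD_set_self _ _ (by omega) _ _]
      by_cases hjj : j' = j
      · subst hjj
        by_cases hjl : j' < (dp.getD i' []).length
        · rw [getD_set_self _ _ hjl]; rw [List.length_set]; exact h3 i' j' hi' hj'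
        · rw [List.set_eq_of_length_le (by omega)] ; exact h3 i' j' hi' hj'
      · rw [getD_set_ne _ _ _ hjj]; exact h3 i' j' hi' hj'
    · rw [setCell, getD_set_ne _ _ _ hii]; exact h3 i' j' hi' hj'

theorem getCell_setCell (dp : List (List (List Int))) (T W : Nat) (h : Wf dp T W)
    (i j k : Nat) (v : Int) (hi : i < T + 1) (hj : j < W + 1) (hk : k < 3)
    (i' j' k' : Nat) :
    getCell (setCell dp i j k v) i' j' k' =
      if i' = i ∧ j' = j ∧ k' = k then v else getCell dp i' j' k' := by
  obtain ⟨h1, h2, h3⟩ := h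
  by_cases hii : i' = i
  · subst hii
    rw [getCell, setCell, getD_set_self _ _ (by omega) _ _]
    by_cases hjj : j' = j
    · subst hjj
      rw [getD_set_self _ _ (by rw [h2 i' hi]; omega) _ _]
      by_cases hkk : k' = k
      · subst hkk
        rw [getD_set_self _ _ (by rw [h3 i' j' hi hj]; omega) _ _]
        simp
      · rw [getD_set_ne _ _ _ hkk, getCell]
        simp [hkk]
    · rw [getD_set_ne _ _ _ hjj, getCell]
      simp [hjj]
  · rw [getCell, setCell, getD_set_ne _ _ _ hii, getCell]
    simp [hii]

theorem getCell_replicate (T W i j k : Nat) :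
    getCell (List.replicate (T + 1) (List.replicate (W + 1) ([0, 0, 0] : List Int))) i j k = 0 := by
  rw [getCell, getD_replicate]
  split
  · rw [getD_replicate]
    split
    · rcases k with _ | _ | _ | k <;> simp
    · simp
  · simp

theorem wf_replicate (T W : Nat) :
    Wf (List.replicate (T + 1) (List.replicate (W + 1) ([0, 0, 0] : List Int))) T W := by
  refine ⟨by simp, ?_, ?_⟩
  · intro i hi; rw [getD_replicate]; simp [hi]
  · intro i j hi hj; rw [getD_replicate]; simp only [hi, if_true]
    rw [getD_replicate]; simp [hj]

-- ---- the invariant carried along A's outer loop ----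
-- after processing time s+1 (s steps beyond time 1): row s+1 holds the two plane values,
-- rows above are still zero
def OInv (trees : List Int) (T W s : Nat) (dp : List (List (List Int))) : Prop :=
  Wf dp T W ∧
  (∀ j, j < W + 1 → getCell dp (s + 1) j 0 = 0 ∧
      getCell dp (s + 1) j 1 = cell1 trees s j ∧
      getCell dp (s + 1) j 2 = cell2 trees s j) ∧
  (∀ i' j k, s + 1 < i' → getCell dp i' j k = 0)

theorem pyGetD_cons_succ (trees : List Int) (m : Nat) (d : Int) :
    PySem.List.pyGetD (0 :: trees) ((m + 1 : Nat) : Int) d = trees.getD m d := by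
  rw [PySem.List.pyGetD_natCast]; simp

-- cell-level facts about one DP step (plum at tree 1 resp. tree 2)
theorem cell2_carry1 (trees : List Int) (s jd : Nat) (hg : gv trees (s + 1) = 1) :
    cell2 trees (s + 1) jd = cell2 trees s jd := by
  rcases Nat.mod_two_eq_zero_or_one jd with hpar | hpar <;>
    simp only [cell2, hpar] <;> norm_num <;> simp only [rowF, rowE, hpar, hg] <;> norm_num

theorem cell1_step1 (trees : List Int) (s jd : Nat) (hg : gv trees (s + 1) = 1) :
    cell1 trees (s + 1) jd =
      (if jd = 0 then cell1 trees s 0 else max (cell1 trees s jd) (cell2 trees s (jd - 1))) + 1 := by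
  by_cases hj0 : jd = 0
  · subst hj0
    simp only [cell1, cell2, rowE, hg]
    norm_num
  · rcases Nat.mod_two_eq_zero_or_one jd with hpar | hpar <;>
      have hpar' : (jd - 1) % 2 = 1 - jd % 2 := by omega
    all_goals
      simp only [cell1, cell2, rowE, rowF, hpar, hpar', hg, hj0]
      norm_num

theorem cell1_carry2 (trees : List Int) (s jd : Nat) (hg : gv trees (s + 1) = 2) :
    cell1 trees (s + 1) jd = cell1 trees s jd := by
  rcases Nat.mod_two_eq_zero_or_one jd with hpar | hpar <;>
    simp only [cell1, hpar] <;> norm_num <;> simp only [rowF, rowE, hpar, hg] <;> norm_num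

theorem cell2_step2 (trees : List Int) (s jd : Nat) (hg : gv trees (s + 1) = 2) :
    cell2 trees (s + 1) jd =
      (if jd = 0 then cell2 trees s 0 else max (cell2 trees s jd) (cell1 trees s (jd - 1))) + 1 := by
  by_cases hj0 : jd = 0
  · subst hj0
    simp only [cell1, cell2, rowF, hg]
    norm_num
  · rcases Nat.mod_two_eq_zero_or_one jd with hpar | hpar <;>
      have hpar' : (jd - 1) % 2 = 1 - jd % 2 := by omega
    all_goals
      simp only [cell1, cell2, rowE, rowF, hpar, hpar', hg, hj0]
      norm_num

-- evaluate one iteration of A's inner loop at nonnegative indices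
theorem stepA_eval1 (trees : List Int) (s jd : Nat) (dp' : List (List (List Int)))
    (hg : gv trees (s + 1) = 1) :
    stepA (0 :: trees) ((s + 2 : Nat) : Int) dp' ((jd : Nat) : Int) =
      (if 0 < jd then
        setCell (setCell dp' (s + 2) jd 2 (getCell dp' (s + 1) jd 2)) (s + 2) jd 1
          (max (getCell (setCell dp' (s + 2) jd 2 (getCell dp' (s + 1) jd 2)) (s + 1) jd 1)
               (getCell (setCell dp' (s + 2) jd 2 (getCell dp' (s + 1) jd 2)) (s + 1) (jd - 1) 2) + 1)
      else
        setCell (setCell dp' (s + 2) jd 2 (getCell dp' (s + 1) jd 2)) (s + 2) jd 1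
          (getCell (setCell dp' (s + 2) jd 2 (getCell dp' (s + 1) jd 2)) (s + 1) jd 1 + 1)) := by
  have hv : PySem.List.pyGetD (0 :: trees) ((s + 2 : Nat) : Int) 0 = 1 := by
    rw [show ((s + 2 : Nat) : Int) = ((s + 1 + 1 : Nat) : Int) from rfl, pyGetD_cons_succ]
    exact hg
  have e1 : (((s + 2 : Nat) : Int)).toNat = s + 2 := by omega
  have e2 : (((s + 2 : Nat) : Int) - 1).toNat = s + 1 := by omega
  have e3 : ((jd : Nat) : Int).toNat = jd := by omega
  have e4 : (((jd : Nat) : Int) - 1).toNat = jd - 1 := by omega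
  have e5 : (0 < ((jd : Nat) : Int)) = (0 < jd) := by simp
  simp only [stepA, hv, e1, e2, e3, e4, e5]
  norm_num [show ((2 : Int)).toNat = 2 from rfl]

theorem stepA_eval2 (trees : List Int) (s jd : Nat) (dp' : List (List (List Int)))
    (hg : gv trees (s + 1) = 2) :
    stepA (0 :: trees) ((s + 2 : Nat) : Int) dp' ((jd : Nat) : Int) =
      (if 0 < jd then
        setCell (setCell dp' (s + 2) jd 1 (getCell dp' (s + 1) jd 1)) (s + 2) jd 2
          (max (getCell (setCell dp' (s + 2) jd 1 (getCell dp' (s + 1) jd 1)) (s + 1) jd 2)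
               (getCell (setCell dp' (s + 2) jd 1 (getCell dp' (s + 1) jd 1)) (s + 1) (jd - 1) 1) + 1)
      else
        setCell (setCell dp' (s + 2) jd 1 (getCell dp' (s + 1) jd 1)) (s + 2) jd 2
          (getCell (setCell dp' (s + 2) jd 1 (getCell dp' (s + 1) jd 1)) (s + 1) jd 2 + 1)) := by
  have hv : PySem.List.pyGetD (0 :: trees) ((s + 2 : Nat) : Int) 0 = 2 := by
    rw [show ((s + 2 : Nat) : Int) = ((s + 1 + 1 : Nat) : Int) from rfl, pyGetD_cons_succ]
    exact hg
  have e1 : (((s + 2 : Nat) : Int)).toNat = s + 2 := by omega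
  have e2 : (((s + 2 : Nat) : Int) - 1).toNat = s + 1 := by omega
  have e3 : ((jd : Nat) : Int).toNat = jd := by omega
  have e4 : (((jd : Nat) : Int) - 1).toNat = jd - 1 := by omega
  have e5 : (0 < ((jd : Nat) : Int)) = (0 < jd) := by simp
  simp only [stepA, hv, e1, e2, e3, e4, e5]
  norm_num [show ((2 : Int)).toNat = 2 from rfl]

-- the partially processed inner loop
def partialRow (trees' : List Int) (i : Int) (dp : List (List (List Int))) (jd : Nat) :
    List (List (List Int)) :=
  (PySem.List.pyRange 0 (jd : Int) 1).foldl (stepA trees' i) dp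

theorem partialRow_succ (trees' : List Int) (i : Int) (dp : List (List (List Int))) (jd : Nat) :
    partialRow trees' i dp (jd + 1) = stepA trees' i (partialRow trees' i dp jd) ((jd : Nat) : Int) := by
  rw [partialRow, show ((jd + 1 : Nat) : Int) = (jd : Int) + 1 from by push_cast; ring,
    PySem.List.pyRange_one_succ_right (by omega : (0 : Int) ≤ (jd : Int)), List.foldl_append]
  rfl

theorem rowLoopA_eq_partialRow (trees' : List Int) (w : Int) (W : Nat) (hw : w = (W : Int))
    (dp : List (List (List Int))) (i : Int) :
    rowLoopA trees' w dp i = partialRow trees' i dp (W + 1) := by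
  rw [rowLoopA, partialRow, hw]
  norm_num

theorem stepA_aux (trees : List Int) (T W s : Nat)
    (hs : s + 1 < T)
    (hplum : gv trees (s + 1) = 1 ∨ gv trees (s + 1) = 2)
    (dp : List (List (List Int))) (hinv : OInv trees T W s dp) :
    ∀ jd, jd ≤ W + 1 →
      Wf (partialRow (0 :: trees) ((s + 2 : Nat) : Int) dp jd) T W ∧
      (∀ j k, getCell (partialRow (0 :: trees) ((s + 2 : Nat) : Int) dp jd) (s + 1) j k =
        getCell dp (s + 1) j k) ∧
      (∀ j, j < jd → getCell (partialRow (0 :: trees) ((s + 2 : Nat) : Int) dp jd) (s + 2) j 0 = 0 ∧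
        getCell (partialRow (0 :: trees) ((s + 2 : Nat) : Int) dp jd) (s + 2) j 1 = cell1 trees (s + 1) j ∧
        getCell (partialRow (0 :: trees) ((s + 2 : Nat) : Int) dp jd) (s + 2) j 2 = cell2 trees (s + 1) j) ∧
      (∀ j k, jd ≤ j → getCell (partialRow (0 :: trees) ((s + 2 : Nat) : Int) dp jd) (s + 2) j k = 0) ∧
      (∀ i' j k, s + 2 < i' → getCell (partialRow (0 :: trees) ((s + 2 : Nat) : Int) dp jd) i' j k = 0) := by
  intro jd
  induction jd with
  | zero =>
    intro _
    have h00 : partialRow (0 :: trees) ((s + 2 : Nat) : Int) dp 0 = dp := by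
      rw [partialRow]
      simp [PySem.List.pyRange_one_eq_nil]
    rw [h00]
    refine ⟨hinv.1, fun j k => rfl, fun j hj => (Nat.not_lt_zero j hj).elim, ?_, ?_⟩
    · intro j k _; exact hinv.2.2 (s + 2) j k (by omega)
    · intro i' j k hi'; exact hinv.2.2 i' j k (by omega)
  | succ jd ih =>
    intro hjd
    obtain ⟨hWf, hrow, hdone, hzero, habove⟩ := ih (by omega)
    have hjdW : jd < W + 1 := by omega
    have hs2 : s + 2 < T + 1 := by omega
    rw [partialRow_succ]
    set D := partialRow (0 :: trees) ((s + 2 : Nat) : Int) dp jd with hD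
    rcases hplum with hg | hg
    · rw [stepA_eval1 trees s jd D hg]
      have hvo : getCell D (s + 1) jd 2 = cell2 trees s jd := by
        rw [hrow]; exact (hinv.2.1 jd hjdW).2.2
      have hWfa : Wf (setCell D (s + 2) jd 2 (getCell D (s + 1) jd 2)) T W :=
        wf_setCell D T W _ _ _ _ hWf
      have hga := getCell_setCell D T W hWf (s + 2) jd 2 (getCell D (s + 1) jd 2) hs2 hjdW (by omega)
      by_cases h0 : 0 < jd
      · rw [if_pos h0]
        have hr1 : getCell (setCell D (s + 2) jd 2 (getCell D (s + 1) jd 2)) (s + 1) jd 1 =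
            cell1 trees s jd := by
          rw [hga, if_neg (by omega : ¬(s + 1 = s + 2 ∧ jd = jd ∧ 1 = 2))]
          rw [hrow]; exact (hinv.2.1 jd hjdW).2.1
        have hr2 : getCell (setCell D (s + 2) jd 2 (getCell D (s + 1) jd 2)) (s + 1) (jd - 1) 2 =
            cell2 trees s (jd - 1) := by
          rw [hga, if_neg (by omega : ¬(s + 1 = s + 2 ∧ jd - 1 = jd ∧ 2 = 2))]
          rw [hrow]; exact (hinv.2.1 (jd - 1) (by omega)).2.2
        rw [hr1, hr2]
        have hWfb : Wf (setCell (setCell D (s + 2) jd 2 (getCell D (s + 1) jd 2)) (s + 2) jd 1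
            (max (cell1 trees s jd) (cell2 trees s (jd - 1)) + 1)) T W :=
          wf_setCell _ T W _ _ _ _ hWfa
        have hgb := getCell_setCell _ T W hWfa (s + 2) jd 1
          (max (cell1 trees s jd) (cell2 trees s (jd - 1)) + 1) hs2 hjdW (by omega)
        have hfin : ∀ i' j' k',
            getCell (setCell (setCell D (s + 2) jd 2 (getCell D (s + 1) jd 2)) (s + 2) jd 1
              (max (cell1 trees s jd) (cell2 trees s (jd - 1)) + 1)) i' j' k' =
            if i' = s + 2 ∧ j' = jd ∧ k' = 1 then max (cell1 trees s jd) (cell2 trees s (jd - 1)) + 1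
            else if i' = s + 2 ∧ j' = jd ∧ k' = 2 then getCell D (s + 1) jd 2
            else getCell D i' j' k' := by
          intro i' j' k'; rw [hgb, hga]
        refine ⟨hWfb, ?_, ?_, ?_, ?_⟩
        · intro j k
          rw [hfin, if_neg (by omega : ¬(s + 1 = s + 2 ∧ j = jd ∧ k = 1)),
            if_neg (by omega : ¬(s + 1 = s + 2 ∧ j = jd ∧ k = 2))]
          exact hrow j k
        · intro j hj
          by_cases hjj : j = jd
          · subst hjj
            refine ⟨?_, ?_, ?_⟩
            · rw [hfin, if_neg (by omega : ¬(s + 2 = s + 2 ∧ j = j ∧ 0 = 1)),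
                if_neg (by omega : ¬(s + 2 = s + 2 ∧ j = j ∧ 0 = 2))]
              exact hzero j 0 le_rfl
            · rw [hfin, if_pos ⟨rfl, rfl, rfl⟩, cell1_step1 trees s j hg, if_neg (by omega)]
            · rw [hfin, if_neg (by omega : ¬(s + 2 = s + 2 ∧ j = j ∧ 2 = 1)),
                if_pos ⟨rfl, rfl, rfl⟩, hvo, cell2_carry1 trees s j hg]
          · refine ⟨?_, ?_, ?_⟩ <;>
              rw [hfin, if_neg (fun h => hjj h.2.1), if_neg (fun h => hjj h.2.1)]
            · exact (hdone j (by omega)).1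
            · exact (hdone j (by omega)).2.1
            · exact (hdone j (by omega)).2.2
        · intro j k hj
          rw [hfin, if_neg (by omega : ¬(s + 2 = s + 2 ∧ j = jd ∧ k = 1)),
            if_neg (by omega : ¬(s + 2 = s + 2 ∧ j = jd ∧ k = 2))]
          exact hzero j k (by omega)
        · intro i' j k hi'
          rw [hfin, if_neg (by omega : ¬(i' = s + 2 ∧ j = jd ∧ k = 1)),
            if_neg (by omega : ¬(i' = s + 2 ∧ j = jd ∧ k = 2))]
          exact habove i' j k hi'
      · -- jd = 0
        rw [if_neg h0]
        have hjd0 : jd = 0 := by omega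
        have hr1 : getCell (setCell D (s + 2) jd 2 (getCell D (s + 1) jd 2)) (s + 1) jd 1 =
            cell1 trees s jd := by
          rw [hga, if_neg (by omega : ¬(s + 1 = s + 2 ∧ jd = jd ∧ 1 = 2))]
          rw [hrow]; exact (hinv.2.1 jd hjdW).2.1
        rw [hr1]
        have hWfb : Wf (setCell (setCell D (s + 2) jd 2 (getCell D (s + 1) jd 2)) (s + 2) jd 1
            (cell1 trees s jd + 1)) T W := wf_setCell _ T W _ _ _ _ hWfa
        have hgb := getCell_setCell _ T W hWfa (s + 2) jd 1 (cell1 trees s jd + 1) hs2 hjdW (by omega)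
        have hfin : ∀ i' j' k',
            getCell (setCell (setCell D (s + 2) jd 2 (getCell D (s + 1) jd 2)) (s + 2) jd 1
              (cell1 trees s jd + 1)) i' j' k' =
            if i' = s + 2 ∧ j' = jd ∧ k' = 1 then cell1 trees s jd + 1
            else if i' = s + 2 ∧ j' = jd ∧ k' = 2 then getCell D (s + 1) jd 2
            else getCell D i' j' k' := by
          intro i' j' k'; rw [hgb, hga]
        refine ⟨hWfb, ?_, ?_, ?_, ?_⟩
        · intro j k
          rw [hfin, if_neg (by omega : ¬(s + 1 = s + 2 ∧ j = jd ∧ k = 1)),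
            if_neg (by omega : ¬(s + 1 = s + 2 ∧ j = jd ∧ k = 2))]
          exact hrow j k
        · intro j hj
          by_cases hjj : j = jd
          · subst hjj
            refine ⟨?_, ?_, ?_⟩
            · rw [hfin, if_neg (by omega : ¬(s + 2 = s + 2 ∧ j = j ∧ 0 = 1)),
                if_neg (by omega : ¬(s + 2 = s + 2 ∧ j = j ∧ 0 = 2))]
              exact hzero j 0 le_rfl
            · rw [hfin, if_pos ⟨rfl, rfl, rfl⟩, cell1_step1 trees s j hg, if_pos hjd0, hjd0]
            · rw [hfin, if_neg (by omega : ¬(s + 2 = s + 2 ∧ j = j ∧ 2 = 1)),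
                if_pos ⟨rfl, rfl, rfl⟩, hvo, cell2_carry1 trees s j hg]
          · refine ⟨?_, ?_, ?_⟩ <;>
              rw [hfin, if_neg (fun h => hjj h.2.1), if_neg (fun h => hjj h.2.1)]
            · exact (hdone j (by omega)).1
            · exact (hdone j (by omega)).2.1
            · exact (hdone j (by omega)).2.2
        · intro j k hj
          rw [hfin, if_neg (by omega : ¬(s + 2 = s + 2 ∧ j = jd ∧ k = 1)),
            if_neg (by omega : ¬(s + 2 = s + 2 ∧ j = jd ∧ k = 2))]
          exact hzero j k (by omega)
        · intro i' j k hi'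
          rw [hfin, if_neg (by omega : ¬(i' = s + 2 ∧ j = jd ∧ k = 1)),
            if_neg (by omega : ¬(i' = s + 2 ∧ j = jd ∧ k = 2))]
          exact habove i' j k hi'
    · rw [stepA_eval2 trees s jd D hg]
      have hvo : getCell D (s + 1) jd 1 = cell1 trees s jd := by
        rw [hrow]; exact (hinv.2.1 jd hjdW).2.1
      have hWfa : Wf (setCell D (s + 2) jd 1 (getCell D (s + 1) jd 1)) T W :=
        wf_setCell D T W _ _ _ _ hWf
      have hga := getCell_setCell D T W hWf (s + 2) jd 1 (getCell D (s + 1) jd 1) hs2 hjdW (by omega)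
      by_cases h0 : 0 < jd
      · rw [if_pos h0]
        have hr1 : getCell (setCell D (s + 2) jd 1 (getCell D (s + 1) jd 1)) (s + 1) jd 2 =
            cell2 trees s jd := by
          rw [hga, if_neg (by omega : ¬(s + 1 = s + 2 ∧ jd = jd ∧ 2 = 1))]
          rw [hrow]; exact (hinv.2.1 jd hjdW).2.2
        have hr2 : getCell (setCell D (s + 2) jd 1 (getCell D (s + 1) jd 1)) (s + 1) (jd - 1) 1 =
            cell1 trees s (jd - 1) := by
          rw [hga, if_neg (by omega : ¬(s + 1 = s + 2 ∧ jd - 1 = jd ∧ 1 = 1))]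
          rw [hrow]; exact (hinv.2.1 (jd - 1) (by omega)).2.1
        rw [hr1, hr2]
        have hWfb : Wf (setCell (setCell D (s + 2) jd 1 (getCell D (s + 1) jd 1)) (s + 2) jd 2
            (max (cell2 trees s jd) (cell1 trees s (jd - 1)) + 1)) T W :=
          wf_setCell _ T W _ _ _ _ hWfa
        have hgb := getCell_setCell _ T W hWfa (s + 2) jd 2
          (max (cell2 trees s jd) (cell1 trees s (jd - 1)) + 1) hs2 hjdW (by omega)
        have hfin : ∀ i' j' k',
            getCell (setCell (setCell D (s + 2) jd 1 (getCell D (s + 1) jd 1)) (s + 2) jd 2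
              (max (cell2 trees s jd) (cell1 trees s (jd - 1)) + 1)) i' j' k' =
            if i' = s + 2 ∧ j' = jd ∧ k' = 2 then max (cell2 trees s jd) (cell1 trees s (jd - 1)) + 1
            else if i' = s + 2 ∧ j' = jd ∧ k' = 1 then getCell D (s + 1) jd 1
            else getCell D i' j' k' := by
          intro i' j' k'; rw [hgb, hga]
        refine ⟨hWfb, ?_, ?_, ?_, ?_⟩
        · intro j k
          rw [hfin, if_neg (by omega : ¬(s + 1 = s + 2 ∧ j = jd ∧ k = 2)),
            if_neg (by omega : ¬(s + 1 = s + 2 ∧ j = jd ∧ k = 1))]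
          exact hrow j k
        · intro j hj
          by_cases hjj : j = jd
          · subst hjj
            refine ⟨?_, ?_, ?_⟩
            · rw [hfin, if_neg (by omega : ¬(s + 2 = s + 2 ∧ j = j ∧ 0 = 2)),
                if_neg (by omega : ¬(s + 2 = s + 2 ∧ j = j ∧ 0 = 1))]
              exact hzero j 0 le_rfl
            · rw [hfin, if_neg (by omega : ¬(s + 2 = s + 2 ∧ j = j ∧ 1 = 2)),
                if_pos ⟨rfl, rfl, rfl⟩, hvo, cell1_carry2 trees s j hg]
            · rw [hfin, if_pos ⟨rfl, rfl, rfl⟩, cell2_step2 trees s j hg, if_neg (by omega)]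
          · refine ⟨?_, ?_, ?_⟩ <;>
              rw [hfin, if_neg (fun h => hjj h.2.1), if_neg (fun h => hjj h.2.1)]
            · exact (hdone j (by omega)).1
            · exact (hdone j (by omega)).2.1
            · exact (hdone j (by omega)).2.2
        · intro j k hj
          rw [hfin, if_neg (by omega : ¬(s + 2 = s + 2 ∧ j = jd ∧ k = 2)),
            if_neg (by omega : ¬(s + 2 = s + 2 ∧ j = jd ∧ k = 1))]
          exact hzero j k (by omega)
        · intro i' j k hi'
          rw [hfin, if_neg (by omega : ¬(i' = s + 2 ∧ j = jd ∧ k = 2)),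
            if_neg (by omega : ¬(i' = s + 2 ∧ j = jd ∧ k = 1))]
          exact habove i' j k hi'
      · -- jd = 0
        rw [if_neg h0]
        have hjd0 : jd = 0 := by omega
        have hr1 : getCell (setCell D (s + 2) jd 1 (getCell D (s + 1) jd 1)) (s + 1) jd 2 =
            cell2 trees s jd := by
          rw [hga, if_neg (by omega : ¬(s + 1 = s + 2 ∧ jd = jd ∧ 2 = 1))]
          rw [hrow]; exact (hinv.2.1 jd hjdW).2.2
        rw [hr1]
        have hWfb : Wf (setCell (setCell D (s + 2) jd 1 (getCell D (s + 1) jd 1)) (s + 2) jd 2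
            (cell2 trees s jd + 1)) T W := wf_setCell _ T W _ _ _ _ hWfa
        have hgb := getCell_setCell _ T W hWfa (s + 2) jd 2 (cell2 trees s jd + 1) hs2 hjdW (by omega)
        have hfin : ∀ i' j' k',
            getCell (setCell (setCell D (s + 2) jd 1 (getCell D (s + 1) jd 1)) (s + 2) jd 2
              (cell2 trees s jd + 1)) i' j' k' =
            if i' = s + 2 ∧ j' = jd ∧ k' = 2 then cell2 trees s jd + 1
            else if i' = s + 2 ∧ j' = jd ∧ k' = 1 then getCell D (s + 1) jd 1
            else getCell D i' j' k' := by
          intro i' j' k'; rw [hgb, hga]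
        refine ⟨hWfb, ?_, ?_, ?_, ?_⟩
        · intro j k
          rw [hfin, if_neg (by omega : ¬(s + 1 = s + 2 ∧ j = jd ∧ k = 2)),
            if_neg (by omega : ¬(s + 1 = s + 2 ∧ j = jd ∧ k = 1))]
          exact hrow j k
        · intro j hj
          by_cases hjj : j = jd
          · subst hjj
            refine ⟨?_, ?_, ?_⟩
            · rw [hfin, if_neg (by omega : ¬(s + 2 = s + 2 ∧ j = j ∧ 0 = 2)),
                if_neg (by omega : ¬(s + 2 = s + 2 ∧ j = j ∧ 0 = 1))]
              exact hzero j 0 le_rfl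
            · rw [hfin, if_neg (by omega : ¬(s + 2 = s + 2 ∧ j = j ∧ 1 = 2)),
                if_pos ⟨rfl, rfl, rfl⟩, hvo, cell1_carry2 trees s j hg]
            · rw [hfin, if_pos ⟨rfl, rfl, rfl⟩, cell2_step2 trees s j hg, if_pos hjd0, hjd0]
          · refine ⟨?_, ?_, ?_⟩ <;>
              rw [hfin, if_neg (fun h => hjj h.2.1), if_neg (fun h => hjj h.2.1)]
            · exact (hdone j (by omega)).1
            · exact (hdone j (by omega)).2.1
            · exact (hdone j (by omega)).2.2
        · intro j k hj
          rw [hfin, if_neg (by omega : ¬(s + 2 = s + 2 ∧ j = jd ∧ k = 2)),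
            if_neg (by omega : ¬(s + 2 = s + 2 ∧ j = jd ∧ k = 1))]
          exact hzero j k (by omega)
        · intro i' j k hi'
          rw [hfin, if_neg (by omega : ¬(i' = s + 2 ∧ j = jd ∧ k = 2)),
            if_neg (by omega : ¬(i' = s + 2 ∧ j = jd ∧ k = 1))]
          exact habove i' j k hi'
theorem rowLoopA_inv (trees : List Int) (w : Int) (T W s : Nat)
    (hw : w = (W : Int)) (hs : s + 1 < T)
    (hplum : gv trees (s + 1) = 1 ∨ gv trees (s + 1) = 2)
    (dp : List (List (List Int))) (hinv : OInv trees T W s dp) :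
    OInv trees T W (s + 1) (rowLoopA (0 :: trees) w dp ((s + 2 : Nat) : Int)) := by
  rw [rowLoopA_eq_partialRow (0 :: trees) w W hw]
  obtain ⟨hWf, hrow, hdone, hzero, habove⟩ :=
    stepA_aux trees T W s hs hplum dp hinv (W + 1) le_rfl
  exact ⟨hWf, fun j hj => hdone j hj, fun i' j k h => habove i' j k (by omega)⟩

theorem outerA (trees : List Int) (w : Int) (T W : Nat)
    (hw : w = (W : Int)) (hT : 1 ≤ T)
    (hslots : ∀ m, 1 ≤ m → m < T → gv trees m = 1 ∨ gv trees m = 2)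
    (dp : List (List (List Int))) (h0 : OInv trees T W 0 dp) :
    ∀ n, n ≤ T - 1 →
      OInv trees T W n ((PySem.List.pyRange 2 (2 + (n : Int)) 1).foldl (rowLoopA (0 :: trees) w) dp) := by
  intro n
  induction n with
  | zero => intro _; simpa [PySem.List.pyRange_one_eq_nil] using h0
  | succ n ih =>
    intro hn
    have h1 : (0 : Int) ≤ 2 + (n : Int) - 2 := by omega
    have : PySem.List.pyRange 2 (2 + ((n : Int) + 1)) 1 =
        PySem.List.pyRange 2 (2 + (n : Int)) 1 ++ [2 + (n : Int)] := by
      have := PySem.List.pyRange_one_succ_right (a := 2) (b := 2 + (n : Int)) (by omega)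
      simpa [add_assoc] using this
    rw [show ((n + 1 : Nat) : Int) = (n : Int) + 1 by push_cast; ring, this, List.foldl_append]
    simp only [List.foldl_cons, List.foldl_nil]
    have hmain := rowLoopA_inv trees w T W n hw (by omega)
      (hslots (n + 1) (by omega) (by omega)) _ (ih (by omega))
    rw [show ((n + 2 : Nat) : Int) = 2 + (n : Int) from by push_cast; ring] at hmain
    exact hmain

theorem getD_eq_get {α : Type} (l : List α) (n : Nat) (d : α) (h : n < l.length) :
    l.getD n d = l[n] := by
  rw [List.getD_eq_getElem?_getD, List.getElem?_eq_getElem h]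
  rfl

theorem eq_triple (l : List Int) (h : l.length = 3) :
    l = [l.getD 0 0, l.getD 1 0, l.getD 2 0] := by
  rcases l with _ | ⟨a, _ | ⟨b, _ | ⟨c, _ | d⟩⟩⟩ <;> simp_all

theorem row_eq (dp : List (List (List Int))) (T W r : Nat) (hWf : Wf dp T W) (hr : r < T + 1) :
    dp.getD r [] = (List.range (W + 1)).map
      (fun j => [getCell dp r j 0, getCell dp r j 1, getCell dp r j 2]) := by
  apply List.ext_getElem
  · rw [hWf.2.1 r hr]; simp
  · intro n h1 h2
    have hn : n < W + 1 := by rw [hWf.2.1 r hr] at h1; exact h1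
    have h3 := hWf.2.2 r n hr hn
    simp only [List.getElem_map, List.getElem_range]
    have h4 : (dp.getD r [])[n] = (dp.getD r []).getD n [] := (getD_eq_get _ _ _ h1).symm
    rw [h4, eq_triple _ h3]
    rfl

theorem pyGetD_one_cons (trees : List Int) :
    PySem.List.pyGetD (0 :: trees) 1 0 = gv trees 0 := by
  rw [show (1 : Int) = ((0 + 1 : Nat) : Int) from by norm_num, pyGetD_cons_succ]
  rfl

theorem OInv_init (trees : List Int) (T W : Nat) (hT : 1 ≤ T) (hW : 1 ≤ W) :
    OInv trees T W 0
      (setCell (setCell (List.replicate (T + 1) (List.replicate (W + 1) ([0, 0, 0] : List Int)))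
          1 0 1 (if gv trees 0 = 1 then 1 else 0))
        1 1 2 (if gv trees 0 = 2 then 1 else 0)) := by
  have hWf0 := wf_replicate T W
  have hWf1 : Wf (setCell (List.replicate (T + 1) (List.replicate (W + 1) ([0, 0, 0] : List Int)))
      1 0 1 (if gv trees 0 = 1 then 1 else 0)) T W := wf_setCell _ T W _ _ _ _ hWf0
  have hga := getCell_setCell _ T W hWf0 1 0 1 (if gv trees 0 = 1 then 1 else 0)
    (by omega) (by omega) (by omega)
  have hgb := getCell_setCell _ T W hWf1 1 1 2 (if gv trees 0 = 2 then 1 else 0)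
    (by omega) (by omega) (by omega)
  refine ⟨wf_setCell _ T W _ _ _ _ hWf1, ?_, ?_⟩
  · intro j hj
    refine ⟨?_, ?_, ?_⟩
    · rw [hgb, if_neg (by omega : ¬((0:Nat) + 1 = 1 ∧ j = 1 ∧ 0 = 2)), hga,
        if_neg (by omega : ¬((0:Nat) + 1 = 1 ∧ j = 0 ∧ 0 = 1)), getCell_replicate]
    · rw [hgb, if_neg (by omega : ¬((0:Nat) + 1 = 1 ∧ j = 1 ∧ 1 = 2)), hga]
      by_cases hj0 : j = 0
      · subst hj0
        rw [if_pos ⟨rfl, rfl, rfl⟩]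
        simp [cell1, rowE]
      · rw [if_neg (by omega : ¬((0:Nat) + 1 = 1 ∧ j = 0 ∧ 1 = 1)), getCell_replicate]
        rcases Nat.mod_two_eq_zero_or_one j with hpar | hpar <;>
          simp only [cell1, hpar] <;> norm_num <;> simp [rowE, rowF, hj0]
        omega
    · rw [hgb]
      by_cases hj1 : j = 1
      · subst hj1
        rw [if_pos ⟨rfl, rfl, rfl⟩]
        simp [cell2, rowE]
      · rw [if_neg (by omega : ¬((0:Nat) + 1 = 1 ∧ j = 1 ∧ 2 = 2)), hga,
          if_neg (by omega : ¬((0:Nat) + 1 = 1 ∧ j = 0 ∧ 2 = 1)), getCell_replicate]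
        rcases Nat.mod_two_eq_zero_or_one j with hpar | hpar <;>
          simp only [cell2, hpar] <;> norm_num <;> simp [rowE, rowF, hj1]
        omega
  · intro i' j k hi'
    rw [hgb, if_neg (by omega : ¬(i' = 1 ∧ j = 1 ∧ k = 2)), hga,
      if_neg (by omega : ¬(i' = 1 ∧ j = 0 ∧ k = 1)), getCell_replicate]

theorem A_char (t w : Int) (trees : List Int) (T W : Nat)
    (ht : t = (T : Int)) (hw : w = (W : Int)) (hT : 1 ≤ T) (hW : 1 ≤ W)
    (hslots : ∀ m, 1 ≤ m → m < T → gv trees m = 1 ∨ gv trees m = 2) :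
    solve t w trees = (PySem.List.max? (((List.range (W + 1)).map
      (fun j => [(0 : Int), cell1 trees (T - 1) j, cell2 trees (T - 1) j])).flatten)
      (fun v => v)).getD 0 := by
  subst ht; subst hw
  simp only [solve, pyGetD_one_cons]
  rw [show (((T : Int)) + 1).toNat = T + 1 from by omega,
    show (((W : Int)) + 1).toNat = W + 1 from by omega,
    show ((T : Int)) + 1 = 2 + ((T - 1 : Nat) : Int) from by omega]
  have hO := outerA trees (W : Int) T W rfl hT hslots _ (OInv_init trees T W hT hW) (T - 1) (by omega)
  have hvals := hO.2.1
  rw [show T - 1 + 1 = T from by omega] at hvals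
  rw [PySem.List.pyGetD_natCast]
  have hrow := row_eq _ T W T hO.1 (by omega)
  refine congrArg (fun l : List (List Int) => (PySem.List.max? l.flatten (fun v => v)).getD 0) ?_
  rw [hrow]
  apply List.map_congr_left
  intro j hj
  have hjW : j < W + 1 := List.mem_range.mp hj
  obtain ⟨h0, h1, h2⟩ := hvals j hjW
  rw [h0, h1, h2]

-- ---- B side: block updates of the two parity rows ----
-- one unit step of each parity row (the s → s+1 case of rowE / rowF, as an operator)
def stepE (v : Int) (r : Nat → Int) : Nat → Int := fun j =>
  if v = ((1 + j % 2 : Nat) : Int) then (if j = 0 then r 0 else max (r j) (r (j - 1))) + 1 else r j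
def stepF (v : Int) (r : Nat → Int) : Nat → Int := fun j =>
  if v = ((2 - j % 2 : Nat) : Int) then (if j = 0 then r 0 else max (r j) (r (j - 1))) + 1 else r j

def listE (l : List Int) (r : Nat → Int) : Nat → Int := l.foldl (fun r v => stepE v r) r
def listF (l : List Int) (r : Nat → Int) : Nat → Int := l.foldl (fun r v => stepF v r) r

-- the block operator of B (a run of c equal drops at once)
def blockE (v c : Int) (r : Nat → Int) : Nat → Int := fun j =>
  if v = ((1 + j % 2 : Nat) : Int) then (if j = 0 then r 0 else max (r j) (r (j - 1))) + c else r j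
def blockF (v c : Int) (r : Nat → Int) : Nat → Int := fun j =>
  if v = ((2 - j % 2 : Nat) : Int) then (if j = 0 then r 0 else max (r j) (r (j - 1))) + c else r j

theorem rowE_succ (g : Nat → Int) (s : Nat) : rowE g (s + 1) = stepE (g (s + 1)) (rowE g s) := by
  funext j; simp [rowE, stepE]

theorem rowF_succ (g : Nat → Int) (s : Nat) : rowF g (s + 1) = stepF (g (s + 1)) (rowF g s) := by
  funext j; simp [rowF, stepF]

theorem stepE_blockE (v c : Int) (hc : 0 ≤ c) (r : Nat → Int) :
    stepE v (blockE v c r) = blockE v (c + 1) r := by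
  funext j
  simp only [stepE, blockE]
  split_ifs <;> omega

theorem stepF_blockF (v c : Int) (hc : 0 ≤ c) (r : Nat → Int) :
    stepF v (blockF v c r) = blockF v (c + 1) r := by
  funext j
  simp only [stepF, blockF]
  split_ifs <;> omega

theorem blockE_eq_listE (v : Int) (n : Nat) (r : Nat → Int) :
    blockE v ((n : Int) + 1) r = listE (List.replicate (n + 1) v) r := by
  induction n with
  | zero =>
    funext j
    simp [blockE, listE, stepE]
  | succ n ih =>
    have hstep : listE (List.replicate (n + 1) v ++ [v]) r =
        stepE v (listE (List.replicate (n + 1) v) r) := by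
      simp [listE, List.foldl_append]
    rw [List.replicate_succ', hstep, ← ih, stepE_blockE v ((n : Int) + 1) (by omega) r]
    congr 1

theorem blockF_eq_listF (v : Int) (n : Nat) (r : Nat → Int) :
    blockF v ((n : Int) + 1) r = listF (List.replicate (n + 1) v) r := by
  induction n with
  | zero =>
    funext j
    simp [blockF, listF, stepF]
  | succ n ih =>
    have hstep : listF (List.replicate (n + 1) v ++ [v]) r =
        stepF v (listF (List.replicate (n + 1) v) r) := by
      simp [listF, List.foldl_append]
    rw [List.replicate_succ', hstep, ← ih, stepF_blockF v ((n : Int) + 1) (by omega) r]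
    congr 1

-- list rows of B as samples of the spec rows
def toRow (W : Nat) (r : Nat → Int) : List Int := (List.range (W + 1)).map r

theorem int_mod_two_cast (k : Nat) : PySem.Int.mod ((k : Nat) : Int) 2 = ((k % 2 : Nat) : Int) := by
  simp only [PySem.Int.mod, Int.fmod_eq_emod]
  split <;> omega

theorem pyRange_zero_cast (W : Nat) :
    PySem.List.pyRange 0 ((W : Int) + 1) 1 = (List.range (W + 1)).map (Nat.cast : Nat → Int) := by
  rw [PySem.List.pyRange_one, show (((W : Int) + 1) - 0).toNat = W + 1 from by omega]
  apply List.map_congr_left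
  intro k _
  simp

theorem getD_map_range' (f : Nat → Int) (n k : Nat) (hk : k < n) (d : Int) :
    ((List.range n).map f).getD k d = f k := by
  rw [getD_eq_get _ _ _ (by simpa using hk)]
  simp

-- the index-derived parity tests of the port, read back as rowE/rowF's tree tests
theorem cond_e (v : Int) (k : Nat) :
    (((k % 2 : Nat) : Int) = (((PySem.List.index? [(1 : Int), 2] v).getD 2 : Nat) : Int)) ↔
      (v = ((1 + k % 2 : Nat) : Int)) := by
  by_cases hv1 : v = 1
  · subst hv1
    rw [show PySem.List.index? [(1 : Int), 2] 1 = some 0 from by decide]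
    simp only [Option.getD_some]
    constructor <;> intro h <;> omega
  by_cases hv2 : v = 2
  · subst hv2
    rw [show PySem.List.index? [(1 : Int), 2] 2 = some 1 from by decide]
    simp only [Option.getD_some]
    constructor <;> intro h <;> omega
  · rw [show PySem.List.index? [(1 : Int), 2] v = none from
      (PySem.List.index?_eq_none_iff _ _).mpr (by simp [hv1, hv2])]
    simp only [Option.getD_none]
    constructor <;> intro h <;> omega
theorem cond_f (v : Int) (k : Nat) :
    (((k % 2 : Nat) : Int) = 1 - (((PySem.List.index? [(1 : Int), 2] v).getD 2 : Nat) : Int)) ↔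
      (v = ((2 - k % 2 : Nat) : Int)) := by
  by_cases hv1 : v = 1
  · subst hv1
    rw [show PySem.List.index? [(1 : Int), 2] 1 = some 0 from by decide]
    simp only [Option.getD_some]
    constructor <;> intro h <;> omega
  by_cases hv2 : v = 2
  · subst hv2
    rw [show PySem.List.index? [(1 : Int), 2] 2 = some 1 from by decide]
    simp only [Option.getD_some]
    constructor <;> intro h <;> omega
  · rw [show PySem.List.index? [(1 : Int), 2] v = none from
      (PySem.List.index?_eq_none_iff _ _).mpr (by simp [hv1, hv2])]
    simp only [Option.getD_none]
    constructor <;> intro h <;> omega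

theorem blockRows_eval (W : Nat) (v c : Int) (re rf : Nat → Int) :
    blockRows ((W : Int)) v c (toRow W re, toRow W rf) =
      (toRow W (blockE v c re), toRow W (blockF v c rf)) := by
  rw [blockRows, pyRange_zero_cast]
  simp only [List.map_map, toRow, Prod.mk.injEq]
  constructor <;> apply List.map_congr_left <;> intro k hk <;>
    have hkW : k < W + 1 := List.mem_range.mp hk
  · have hcond : (PySem.Int.mod ((k : Nat) : Int) 2 =
        (((PySem.List.index? [(1 : Int), 2] v).getD 2 : Nat) : Int)) = (v = ((1 + k % 2 : Nat) : Int)) := by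
      rw [int_mod_two_cast]; exact propext (cond_e v k)
    have he : PySem.List.pyGetD ((List.range (W + 1)).map re) ((k : Nat) : Int) 0 = re k := by
      rw [PySem.List.pyGetD_natCast, getD_map_range' _ _ _ hkW]
    by_cases hk0 : k = 0
    · subst hk0
      simp only [Function.comp_apply, hcond, he, blockE]
      norm_num
    · have he1 : PySem.List.pyGetD ((List.range (W + 1)).map re) (((k : Nat) : Int) - 1) 0 = re (k - 1) := by
        rw [show (((k : Nat) : Int) - 1) = ((k - 1 : Nat) : Int) from by omega,
          PySem.List.pyGetD_natCast, getD_map_range' _ _ _ (by omega)]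
      have hk0' : ¬ ((k : Int) = 0) := by omega
      simp only [Function.comp_apply, hcond, he, he1, blockE, hk0', if_false, hk0]
  · have hcond : (PySem.Int.mod ((k : Nat) : Int) 2 =
        1 - (((PySem.List.index? [(1 : Int), 2] v).getD 2 : Nat) : Int)) = (v = ((2 - k % 2 : Nat) : Int)) := by
      rw [int_mod_two_cast]; exact propext (cond_f v k)
    have he : PySem.List.pyGetD ((List.range (W + 1)).map rf) ((k : Nat) : Int) 0 = rf k := by
      rw [PySem.List.pyGetD_natCast, getD_map_range' _ _ _ hkW]
    by_cases hk0 : k = 0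
    · subst hk0
      simp only [Function.comp_apply, hcond, he, blockF]
      norm_num
    · have he1 : PySem.List.pyGetD ((List.range (W + 1)).map rf) (((k : Nat) : Int) - 1) 0 = rf (k - 1) := by
        rw [show (((k : Nat) : Int) - 1) = ((k - 1 : Nat) : Int) from by omega,
          PySem.List.pyGetD_natCast, getD_map_range' _ _ _ (by omega)]
      have hk0' : ¬ ((k : Int) = 0) := by omega
      simp only [Function.comp_apply, hcond, he, he1, blockF, hk0', if_false, hk0]

theorem drop_takeWhile_length (p : Int → Bool) : ∀ (l : List Int),
    l.drop (l.takeWhile p).length = l.dropWhile p := by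
  intro l
  induction l with
  | nil => simp
  | cons a l ih =>
    by_cases h : p a
    · simp [h, ih]
    · simp [h]

theorem takeWhile_eq_replicate (v : Int) (l : List Int) :
    l.takeWhile (fun x => x == v) =
      List.replicate (l.takeWhile (fun x => x == v)).length v := by
  apply List.eq_replicate_of_mem
  intro b hb
  have := List.mem_takeWhile_imp hb
  simpa using this

theorem loopB_eval (W : Nat) :
    ∀ (n : Nat) (l : List Int), l.length ≤ n → ∀ (re rf : Nat → Int),
      loopB ((W : Int)) l (toRow W re, toRow W rf) =
        (toRow W (listE l re), toRow W (listF l rf)) := by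
  intro n
  induction n with
  | zero =>
    intro l hl re rf
    have : l = [] := List.eq_nil_of_length_eq_zero (by omega)
    subst this
    simp [loopB, listE, listF]
  | succ n ih =>
    intro l hl re rf
    match l with
    | [] => simp [loopB, listE, listF]
    | v :: rest =>
      rw [loopB, blockRows_eval]
      have hdrop : rest.drop (rest.takeWhile (fun x => x == v)).length =
          rest.dropWhile (fun x => x == v) := drop_takeWhile_length _ rest
      have hsplit : v :: rest =
          List.replicate ((rest.takeWhile (fun x => x == v)).length + 1) v ++
            rest.dropWhile (fun x => x == v) := by
        rw [List.replicate_succ, List.cons_append]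
        congr 1
        conv_lhs => rw [← List.takeWhile_append_dropWhile (p := fun x => x == v) (l := rest)]
        congr 1
        exact takeWhile_eq_replicate v rest
      have hlen : (rest.dropWhile (fun x => x == v)).length ≤ n := by
        have := List.length_dropWhile_le (p := fun x => x == v) (l := rest)
        simp at hl
        omega
      rw [hdrop, blockE_eq_listE, blockF_eq_listF, ih _ hlen]
      have hE : listE (rest.dropWhile (fun x => x == v))
          (listE (List.replicate ((rest.takeWhile (fun x => x == v)).length + 1) v) re) =
          listE (v :: rest) re := by
        conv_rhs => rw [hsplit]
        simp only [listE]
        rw [List.foldl_append]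
      have hF : listF (rest.dropWhile (fun x => x == v))
          (listF (List.replicate ((rest.takeWhile (fun x => x == v)).length + 1) v) rf) =
          listF (v :: rest) rf := by
        conv_rhs => rw [hsplit]
        simp only [listF]
        rw [List.foldl_append]
      rw [hE, hF]

theorem rowE_eq_listE (g : Nat → Int) (s : Nat) :
    rowE g s = listE ((List.range' 1 s).map g) (rowE g 0) := by
  induction s with
  | zero => simp [listE]
  | succ s ih =>
    rw [List.range'_1_concat, List.map_append, listE, List.foldl_append]
    simp only [List.map_cons, List.map_nil, List.foldl_cons, List.foldl_nil]
    rw [← listE, ← ih, rowE_succ, Nat.add_comm 1 s]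

theorem rowF_eq_listF (g : Nat → Int) (s : Nat) :
    rowF g s = listF ((List.range' 1 s).map g) (rowF g 0) := by
  induction s with
  | zero => simp [listF]
  | succ s ih =>
    rw [List.range'_1_concat, List.map_append, listF, List.foldl_append]
    simp only [List.map_cons, List.map_nil, List.foldl_cons, List.foldl_nil]
    rw [← listF, ← ih, rowF_succ, Nat.add_comm 1 s]

-- the trees[1:t] slice seen through gv
theorem slice_eq_map_range' (trees : List Int) (t : Int) (T : Nat)
    (ht : t = (T : Int)) (hT : 1 ≤ T) (hlen : T ≤ trees.length) :
    PySem.List.slice trees (some 1) (some t) = (List.range' 1 (T - 1)).map (gv trees) := by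
  subst ht
  rw [show ((1 : Int)) = ((1 : Nat) : Int) from rfl, PySem.List.slice_natCast]
  apply List.ext_getElem
  · simp [List.length_range']
    omega
  · intro n h1 h2
    have hn : n < T - 1 := by simpa [List.length_range'] using h2
    have hin : 1 + n < trees.length := by omega
    simp only [List.getElem_take, List.getElem_drop, List.getElem_map, List.getElem_range'_1]
    rw [gv, getD_eq_get _ _ _ hin]

-- the initial rows of B as samples of the spec rows at s = 0
theorem e0_eq (trees : List Int) (w : Int) (W : Nat) (hw : w = (W : Int)) (hW : 1 ≤ W) :
    ((List.replicate (w + 1).toNat (0 : Int)).set 0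
        (if PySem.List.pyGetD trees 0 0 = 1 then 1 else 0)).set 1
        (if PySem.List.pyGetD trees 0 0 = 2 then 1 else 0) = toRow W (rowE (gv trees) 0) := by
  subst hw
  rw [show (((W : Int)) + 1).toNat = W + 1 from by omega]
  apply List.ext_getElem
  · simp [toRow]
  · intro n h1 h2
    have hn : n < W + 1 := by simpa using h1
    have hL : (((List.replicate (W + 1) (0 : Int)).set 0
        (if PySem.List.pyGetD trees 0 0 = 1 then 1 else 0)).set 1
        (if PySem.List.pyGetD trees 0 0 = 2 then 1 else 0))[n] =
        (((List.replicate (W + 1) (0 : Int)).set 0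
        (if PySem.List.pyGetD trees 0 0 = 1 then 1 else 0)).set 1
        (if PySem.List.pyGetD trees 0 0 = 2 then 1 else 0)).getD n 0 :=
      (getD_eq_get _ _ _ h1).symm
    rw [hL]
    simp only [toRow, List.getElem_map, List.getElem_range, PySem.List.pyGetD_zero]
    by_cases hn0 : n = 0
    · subst hn0
      rw [getD_set_ne _ _ _ (by omega), getD_set_self _ _ (by simp) _ _]
      simp [rowE, gv]
    · by_cases hn1 : n = 1
      · subst hn1
        rw [getD_set_self _ _ (by simp; omega) _ _]
        simp [rowE, gv, hn0]
      · rw [getD_set_ne _ _ _ hn1, getD_set_ne _ _ _ hn0, getD_replicate]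
        simp only [hn, if_true]
        simp [rowE, hn0, hn1]

theorem f0_eq (trees : List Int) (w : Int) (W : Nat) (hw : w = (W : Int)) :
    (List.replicate (w + 1).toNat (0 : Int)) = toRow W (rowF (gv trees) 0) := by
  subst hw
  rw [show (((W : Int)) + 1).toNat = W + 1 from by omega, toRow]
  rw [List.map_congr_left (fun j _ => by simp only [rowF] : ∀ j ∈ List.range (W + 1),
    rowF (gv trees) 0 j = (fun _ => (0 : Int)) j)]
  rw [List.map_const', List.length_range]

theorem B_char (t w : Int) (trees : List Int) (T W : Nat)
    (ht : t = (T : Int)) (hw : w = (W : Int)) (hT : 1 ≤ T) (hW : 1 ≤ W)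
    (hlen : T ≤ trees.length) :
    solve_alt t w trees =
      (PySem.List.max? (toRow W (rowE (gv trees) (T - 1)) ++ toRow W (rowF (gv trees) (T - 1)))
        (fun v => v)).getD 0 := by
  simp only [solve_alt]
  rw [e0_eq trees w W hw hW, f0_eq trees w W hw, slice_eq_map_range' trees t T ht hT hlen, hw,
    loopB_eval W ((List.range' 1 (T - 1)).map (gv trees)).length _ le_rfl,
    ← rowE_eq_listE, ← rowF_eq_listF]

-- max of the flattened A row = max over the appended B rows
theorem maxD_append (l1 l2 : List Int) (h1 : l1 ≠ []) (h2 : l2 ≠ []) :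
    (PySem.List.max? (l1 ++ l2) (fun v => v)).getD 0 =
      max ((PySem.List.max? l1 (fun v => v)).getD 0) ((PySem.List.max? l2 (fun v => v)).getD 0) := by
  have hA2 : PySem.List.max? l1 (fun v => v) ≠ none :=
    fun h => h1 ((PySem.List.max?_eq_none_iff _ _).mp h)
  have hB2 : PySem.List.max? l2 (fun v => v) ≠ none :=
    fun h => h2 ((PySem.List.max?_eq_none_iff _ _).mp h)
  have hF2 : PySem.List.max? (l1 ++ l2) (fun v => v) ≠ none := by
    intro h
    have := (PySem.List.max?_eq_none_iff _ _).mp h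
    simp [h1] at this
  obtain ⟨m1, hm1⟩ := Option.ne_none_iff_exists'.mp hA2
  obtain ⟨m2, hm2⟩ := Option.ne_none_iff_exists'.mp hB2
  obtain ⟨m, hm⟩ := Option.ne_none_iff_exists'.mp hF2
  rw [hm1, hm2, hm]
  simp only [Option.getD_some]
  have hm1I := PySem.List.max?_isMax hm1
  have hm2I := PySem.List.max?_isMax hm2
  have hmI := PySem.List.max?_isMax hm
  apply le_antisymm
  · rcases List.mem_append.mp (PySem.List.max?_mem hm) with h | h
    · exact le_trans (hm1I _ h) (le_max_left _ _)
    · exact le_trans (hm2I _ h) (le_max_right _ _)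
  · apply max_le
    · exact hmI _ (List.mem_append.mpr (Or.inl (PySem.List.max?_mem hm1)))
    · exact hmI _ (List.mem_append.mpr (Or.inr (PySem.List.max?_mem hm2)))

theorem max_flatten_eq (n : Nat) (hn : 0 < n) (A B : Nat → Int) (hA : ∀ j, 0 ≤ A j) :
    (PySem.List.max? (((List.range n).map (fun j =>
        [(0 : Int), if j % 2 = 0 then A j else B j, if j % 2 = 0 then B j else A j])).flatten)
      (fun v => v)).getD 0 =
    max ((PySem.List.max? ((List.range n).map A) (fun v => v)).getD 0)
        ((PySem.List.max? ((List.range n).map B) (fun v => v)).getD 0) := by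
  have h0n : 0 ∈ List.range n := List.mem_range.mpr hn
  have hA1 : (List.range n).map A ≠ [] := by
    simp [List.ne_nil_of_mem (List.mem_map_of_mem h0n)]
  have hB1 : (List.range n).map B ≠ [] := by
    simp [List.ne_nil_of_mem (List.mem_map_of_mem h0n)]
  have hFl : ((List.range n).map (fun j =>
      [(0 : Int), if j % 2 = 0 then A j else B j, if j % 2 = 0 then B j else A j])).flatten ≠ [] := by
    apply List.ne_nil_of_mem (a := (0 : Int))
    rw [List.mem_flatten]
    exact ⟨_, List.mem_map_of_mem h0n, by simp⟩
  have hA2 : PySem.List.max? ((List.range n).map A) (fun v => v) ≠ none :=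
    fun h => hA1 ((PySem.List.max?_eq_none_iff _ _).mp h)
  have hB2 : PySem.List.max? ((List.range n).map B) (fun v => v) ≠ none :=
    fun h => hB1 ((PySem.List.max?_eq_none_iff _ _).mp h)
  have hF2 : PySem.List.max? (((List.range n).map (fun j =>
      [(0 : Int), if j % 2 = 0 then A j else B j, if j % 2 = 0 then B j else A j])).flatten)
      (fun v => v) ≠ none :=
    fun h => hFl ((PySem.List.max?_eq_none_iff _ _).mp h)
  obtain ⟨me, hme⟩ := Option.ne_none_iff_exists'.mp hA2
  obtain ⟨mf, hmf⟩ := Option.ne_none_iff_exists'.mp hB2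
  obtain ⟨ma, hma⟩ := Option.ne_none_iff_exists'.mp hF2
  rw [hme, hmf, hma]
  simp only [Option.getD_some]
  have hmeI := PySem.List.max?_isMax hme
  have hmfI := PySem.List.max?_isMax hmf
  have hmaI := PySem.List.max?_isMax hma
  obtain ⟨j1, hj1, hj1e⟩ := List.mem_map.mp (PySem.List.max?_mem hme)
  obtain ⟨j2, hj2, hj2e⟩ := List.mem_map.mp (PySem.List.max?_mem hmf)
  have hme0 : 0 ≤ me := hj1e ▸ hA j1
  apply le_antisymm
  · obtain ⟨blk, hblk, hmablk⟩ := List.mem_flatten.mp (PySem.List.max?_mem hma)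
    obtain ⟨j, hj, rfl⟩ := List.mem_map.mp hblk
    have hAj : A j ≤ me := hmeI _ (List.mem_map_of_mem hj)
    have hBj : B j ≤ mf := hmfI _ (List.mem_map_of_mem hj)
    simp only [List.mem_cons, List.not_mem_nil, or_false] at hmablk
    rcases hmablk with h | h | h
    · exact h ▸ le_trans hme0 (le_max_left _ _)
    · rcases Nat.mod_two_eq_zero_or_one j with hp | hp <;> simp only [hp] at h <;> norm_num at h
      · exact h ▸ le_trans hAj (le_max_left _ _)
      · exact h ▸ le_trans hBj (le_max_right _ _)
    · rcases Nat.mod_two_eq_zero_or_one j with hp | hp <;> simp only [hp] at h <;> norm_num at h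
      · exact h ▸ le_trans hBj (le_max_right _ _)
      · exact h ▸ le_trans hAj (le_max_left _ _)
  · apply max_le
    · have hmem : me ∈ ((List.range n).map (fun j =>
          [(0 : Int), if j % 2 = 0 then A j else B j, if j % 2 = 0 then B j else A j])).flatten := by
        rw [List.mem_flatten]
        refine ⟨_, List.mem_map_of_mem hj1, ?_⟩
        rcases Nat.mod_two_eq_zero_or_one j1 with hp | hp <;> simp [hp, ← hj1e]
      exact hmaI _ hmem
    · have hmem : mf ∈ ((List.range n).map (fun j =>
          [(0 : Int), if j % 2 = 0 then A j else B j, if j % 2 = 0 then B j else A j])).flatten := by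
        rw [List.mem_flatten]
        refine ⟨_, List.mem_map_of_mem hj2, ?_⟩
        rcases Nat.mod_two_eq_zero_or_one j2 with hp | hp <;> simp [hp, ← hj2e]
      exact hmaI _ hmem

-- ===== VERDICT (by name: the statement is the Claim_ definition above) =====
theorem solve_spec : Claim_equal_solve := by
  intro t w trees _ hp
  unfold Spec_solve
  obtain ⟨ht1, hw1, hlen, hvals⟩ := hp
  have ht : t = (t.toNat : Int) := by omega
  have hw : w = (w.toNat : Int) := by omega
  have hT : 1 ≤ t.toNat := by omega
  have hW : 1 ≤ w.toNat := by omega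
  have hslots : ∀ m, 1 ≤ m → m < t.toNat → gv trees m = 1 ∨ gv trees m = 2 := by
    intro m h1 h2
    have hmlen : m < trees.length := by omega
    have hmem : trees[m] ∈ (trees.take t.toNat).drop 1 := by
      rw [List.mem_iff_getElem]
      refine ⟨m - 1, by simp [List.length_take]; omega, ?_⟩
      rw [List.getElem_drop, List.getElem_take]
      congr 1
      omega
    have hg : gv trees m = trees[m] := by rw [gv, getD_eq_get _ _ _ hmlen]
    rw [hg]
    exact hvals _ hmem
  rw [A_char t w trees t.toNat w.toNat ht hw hT hW hslots,
    B_char t w trees t.toNat w.toNat ht hw hT hW (by omega)]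
  rw [maxD_append _ _ (by simp [toRow]) (by simp [toRow])]
  simp only [cell1, cell2, toRow]
  exact max_flatten_eq (w.toNat + 1) (by omega) (fun j => rowE (gv trees) (t.toNat - 1) j)
    (fun j => rowF (gv trees) (t.toNat - 1) j) (fun j => rowE_nonneg _ _ _)
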